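-- pv_equiv track=rewrite | github.com/mzwiesler/advent-of-code2024 | day22/part2.py | find_best_sequence
-- ===== SOURCE A (Python) =====
-- def next_secret_number(secret):
--     # Step 1: Multiply by 64, mix, and prune
--     secret = (secret ^ (secret * 64)) % 16777216
--     # Step 2: Divide by 32, mix, and prune
--     secret = (secret ^ (secret // 32)) % 16777216
--     # Step 3: Multiply by 2048, mix, and prune
--     secret = (secret ^ (secret * 2048)) % 16777216
--     return secret
--
-- def generate_prices(initial_secret, iterations):
--     prices = [initial_secret % 10]
--     secret = initial_secret
--     for _ in range(iterations):
--         secret = next_secret_number(secret)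
--         prices.append(secret % 10)
--     return prices
--
-- def find_best_sequence(initial_secret, iterations, result):
--     prices = generate_prices(initial_secret, iterations)
--     seen = set()
--     for i in range(len(prices) - 4):
--         seq = prices[i : i + 5]
--         diff = [seq[i + 1] - seq[i] for i in range((len(seq) - 1))]
--         diff_str = ",".join(map(str, diff))
--         if diff_str in seen:
--             continue
--         seen.add(diff_str)
--         if diff_str not in result:
--             result[diff_str] = seq[-1]
--         else:
--             result[diff_str] += seq[-1]
--     return result
-- ===== SOURCE B (Python) =====
-- def next_secret_number(secret):
--     secret = (secret ^ (secret * 64)) % 16777216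
--     secret = (secret ^ (secret // 32)) % 16777216
--     secret = (secret ^ (secret * 2048)) % 16777216
--     return secret
--
--
-- def find_best_sequence(initial_secret, iterations, result):
--     # Streaming pass: never materializes the price list; keeps a rolling
--     # window of the last 4 price differences while generating secrets.
--     s = initial_secret
--     prev = initial_secret % 10
--     window = []
--     seen = set()
--     for _ in range(iterations):
--         s = next_secret_number(s)
--         p = s % 10
--         window = (window + [p - prev])[-4:]
--         prev = p
--         if len(window) == 4:
--             key = ",".join(map(str, window))
--             if key not in seen:
--                 seen.add(key)
--                 result[key] = result.get(key, 0) + p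
--     return result
-- ===== Notes on version B (the rewrite author's own statement) =====
-- stated objective: alternative
-- what changed: A materializes the full price list and then re-scans it with index arithmetic, slicing a fresh 5-window and recomputing its diffs at every position; B is a streaming one-pass fold that never builds the price list at all: it maintains a rolling window of the last 4 diffs while generating the secrets and updates the result dict the moment a window completes.
import Mathlib
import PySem

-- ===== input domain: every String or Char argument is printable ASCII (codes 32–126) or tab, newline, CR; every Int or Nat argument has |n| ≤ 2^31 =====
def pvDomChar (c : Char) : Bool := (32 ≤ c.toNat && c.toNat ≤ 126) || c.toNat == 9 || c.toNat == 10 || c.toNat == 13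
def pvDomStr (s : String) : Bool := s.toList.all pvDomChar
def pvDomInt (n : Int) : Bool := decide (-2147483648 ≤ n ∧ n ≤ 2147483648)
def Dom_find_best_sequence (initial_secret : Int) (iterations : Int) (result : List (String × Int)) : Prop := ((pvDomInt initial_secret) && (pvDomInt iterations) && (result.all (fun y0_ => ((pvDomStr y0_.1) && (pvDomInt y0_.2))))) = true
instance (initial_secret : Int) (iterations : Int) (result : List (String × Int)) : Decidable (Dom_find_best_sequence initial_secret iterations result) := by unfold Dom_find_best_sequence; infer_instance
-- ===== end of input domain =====

-- B replaces A's two-phase algorithm (materialize the whole price list, then re-scan it slicing a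
-- 5-window at every index) by a single streaming fold that never builds the price list: it keeps a
-- rolling window of the last 4 price diffs while generating secrets and updates the dict as soon as
-- a window completes; same returned mapping, proved equal. (Both Pythons mutate `result` in place
-- identically; the equivalence proved here is about the returned mapping.)


-- ===== PORT A =====
def pvA_next_secret (secret : Int) : Int :=
  let s1 := PySem.Int.mod (PySem.Int.bxor secret (secret * 64)) 16777216
  let s2 := PySem.Int.mod (PySem.Int.bxor s1 (PySem.Int.floordiv s1 32)) 16777216
  PySem.Int.mod (PySem.Int.bxor s2 (s2 * 2048)) 16777216

def pvA_genStep (st : Int × List Int) (_ : Int) : Int × List Int :=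
  let s := pvA_next_secret st.1
  (s, st.2 ++ [PySem.Int.mod s 10])

def pvA_generate_prices (initial_secret : Int) (iterations : Int) : List Int :=
  ((PySem.List.pyRange 0 iterations 1).foldl pvA_genStep
    (initial_secret, [PySem.Int.mod initial_secret 10])).2

def pvA_step (prices : List Int) (st : PySem.Set String × PySem.Dict String Int) (i : Int) :
    PySem.Set String × PySem.Dict String Int :=
  let seq := PySem.List.slice prices (some i) (some (i + 5))
  let diff := (PySem.List.pyRange 0 ((seq.length : Int) - 1) 1).map
      (fun j => PySem.List.pyGetD seq (j + 1) 0 - PySem.List.pyGetD seq j 0)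
  let diff_str := PySem.Str.join "," (diff.map PySem.Int.toStr)
  if PySem.Set.contains st.1 diff_str then st
  else
    let seen := PySem.Set.add st.1 diff_str
    if st.2.contains diff_str = false then
      (seen, st.2.insert diff_str (PySem.List.pyGetD seq (-1) 0))
    else
      (seen, st.2.modify diff_str 0 (· + PySem.List.pyGetD seq (-1) 0))

def find_best_sequence (initial_secret : Int) (iterations : Int) (result : List (String × Int)) :
    List (String × Int) :=
  let prices := pvA_generate_prices initial_secret iterations
  ((PySem.List.pyRange 0 ((prices.length : Int) - 4) 1).foldl (pvA_step prices)
    ((PySem.Set.empty : PySem.Set String), PySem.Dict.ofList result)).2.items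

-- ===== PORT B =====
def pvB_next_secret (secret : Int) : Int :=
  let s1 := PySem.Int.mod (PySem.Int.bxor secret (secret * 64)) 16777216
  let s2 := PySem.Int.mod (PySem.Int.bxor s1 (PySem.Int.floordiv s1 32)) 16777216
  PySem.Int.mod (PySem.Int.bxor s2 (s2 * 2048)) 16777216

-- one iteration of B's streaming loop: state (s, prev, window, seen, result)
def pvB_iter (st : Int × Int × List Int × PySem.Set String × PySem.Dict String Int) (_ : Int) :
    Int × Int × List Int × PySem.Set String × PySem.Dict String Int :=
  let s := pvB_next_secret st.1
  let p := PySem.Int.mod s 10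
  let w := PySem.List.slice (st.2.2.1 ++ [p - st.2.1]) (some (-4)) none
  if w.length = 4 then
    let key := PySem.Str.join "," (w.map PySem.Int.toStr)
    if PySem.Set.contains st.2.2.2.1 key then (s, p, w, st.2.2.2.1, st.2.2.2.2)
    else (s, p, w, PySem.Set.add st.2.2.2.1 key,
          st.2.2.2.2.insert key (st.2.2.2.2.getD key 0 + p))
  else (s, p, w, st.2.2.2.1, st.2.2.2.2)

def find_best_sequence_alt (initial_secret : Int) (iterations : Int) (result : List (String × Int)) :
    List (String × Int) :=
  ((PySem.List.pyRange 0 iterations 1).foldl pvB_iter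
    (initial_secret, PySem.Int.mod initial_secret 10, ([] : List Int),
     (PySem.Set.empty : PySem.Set String), PySem.Dict.ofList result)).2.2.2.2.items

-- ===== PRECONDITION & SPEC =====
def Spec_find_best_sequence (initial_secret : Int) (iterations : Int) (result : List (String × Int)) (out : List (String × Int)) : Prop := out = find_best_sequence_alt initial_secret iterations result
instance (initial_secret : Int) (iterations : Int) (result : List (String × Int)) (out : List (String × Int)) : Decidable (Spec_find_best_sequence initial_secret iterations result out) := by unfold Spec_find_best_sequence; infer_instance

-- ===== CLAIM (what is proved, stated in full; the proofs are below) =====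
def Claim_equal_find_best_sequence : Prop := ∀ (initial_secret : Int) (iterations : Int) (result : List (String × Int)), Dom_find_best_sequence initial_secret iterations result → Spec_find_best_sequence initial_secret iterations result (find_best_sequence initial_secret iterations result)

-- ===== LEMMAS AND PROOFS =====

-- ghost values for the proof: A's generator state after t iterations, the diff list, A's window fold
def pvGen (init : Int) (t : Nat) : Int × List Int :=
  (PySem.List.pyRange 0 (t : Int) 1).foldl pvA_genStep (init, [PySem.Int.mod init 10])

def pvDiffs : List Int → List Int
  | a :: b :: t => (b - a) :: pvDiffs (b :: t)
  | _ => []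

def pvAfold (ps : List Int) (d0 : PySem.Dict String Int) (m : Nat) :
    PySem.Set String × PySem.Dict String Int :=
  (PySem.List.pyRange 0 (m : Int) 1).foldl (pvA_step ps)
    ((PySem.Set.empty : PySem.Set String), d0)

lemma pvDiffs_length : ∀ l : List Int, (pvDiffs l).length = l.length - 1 := by
  intro l
  induction l with
  | nil => rfl
  | cons a t ih =>
    cases t with
    | nil => rfl
    | cons b t' => simpa [pvDiffs] using ih

lemma pvDiffs_drop : ∀ (j : Nat) (l : List Int), (pvDiffs l).drop j = pvDiffs (l.drop j) := by
  intro j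
  induction j with
  | zero => simp
  | succ j ih =>
    intro l
    match l with
    | [] => rfl
    | [a] => cases j <;> rfl
    | a :: b :: t => simpa [pvDiffs] using ih (b :: t)

lemma pvDiffs_snoc : ∀ (l : List Int) (p : Int), l ≠ [] →
    pvDiffs (l ++ [p]) = pvDiffs l ++ [p - l.getLastD 0] := by
  intro l
  induction l with
  | nil => intro p h; exact absurd rfl h
  | cons a t ih =>
    intro p _
    cases t with
    | nil => rfl
    | cons b t' =>
      have h2 := ih p (by simp)
      simp only [List.cons_append, pvDiffs] at h2 ⊢
      rw [h2]
      simp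

lemma pvGen_succ (init : Int) (t : Nat) :
    pvGen init (t + 1) = pvA_genStep (pvGen init t) (t : Int) := by
  unfold pvGen
  rw [show ((t + 1 : Nat) : Int) = (t : Int) + 1 by push_cast; ring,
      PySem.List.pyRange_one_succ_right (by positivity), List.foldl_append]
  rfl

lemma pvGen_len (init : Int) (t : Nat) : (pvGen init t).2.length = t + 1 := by
  induction t with
  | zero => rfl
  | succ t ih => rw [pvGen_succ]; simp [pvA_genStep, ih]

lemma pv_five_of_len (l : List Int) (h : 5 ≤ l.length) :
    ∃ a b c d e t, l = a :: b :: c :: d :: e :: t := by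
  match l, h with
  | a :: b :: c :: d :: e :: t, _ => exact ⟨a, b, c, d, e, t, rfl⟩

lemma pv_seq_eq (ps : List Int) (j : Nat) (a b c d e : Int) (t : List Int)
    (hdrop : ps.drop j = a :: b :: c :: d :: e :: t) :
    PySem.List.slice ps (some (j : Int)) (some ((j : Int) + 5)) = [a, b, c, d, e] := by
  rw [show ((j : Int) + 5) = ((j : Int) + ((5 : Nat) : Int)) by norm_num,
      PySem.List.slice_natCast_add, hdrop]
  simp

lemma pvA_step_append (ps r : List Int) (st : PySem.Set String × PySem.Dict String Int)
    (j : Nat) (h : j + 5 ≤ ps.length) :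
    pvA_step (ps ++ r) st (j : Int) = pvA_step ps st (j : Int) := by
  obtain ⟨a, b, c, d, e, t, hdrop⟩ := pv_five_of_len (ps.drop j) (by simp; omega)
  have hdrop' : (ps ++ r).drop j = a :: b :: c :: d :: e :: (t ++ r) := by
    rw [List.drop_append_of_le_length (by omega), hdrop]; rfl
  simp only [pvA_step]
  rw [pv_seq_eq ps j a b c d e t hdrop, pv_seq_eq (ps ++ r) j a b c d e (t ++ r) hdrop']

lemma pvAfold_append (ps r : List Int) (d0 : PySem.Dict String Int) :
    ∀ m : Nat, m + 4 ≤ ps.length → pvAfold (ps ++ r) d0 m = pvAfold ps d0 m := by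
  intro m
  induction m with
  | zero => intro _; simp [pvAfold, PySem.List.pyRange_one_eq_nil]
  | succ m ih =>
    intro h
    unfold pvAfold
    rw [show ((m + 1 : Nat) : Int) = (m : Int) + 1 by push_cast; ring,
        PySem.List.pyRange_one_succ_right (by positivity), List.foldl_append, List.foldl_append]
    have := ih (by omega)
    unfold pvAfold at this
    rw [this]
    simpa using pvA_step_append ps r _ m (by omega)

-- A's step at the last possible window, written in B's shape
lemma pvA_step_last (ps : List Int) (P : PySem.Set String × PySem.Dict String Int)
    (j : Nat) (a b c d e : Int) (hdrop : ps.drop j = [a, b, c, d, e]) :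
    pvA_step ps P (j : Int) =
      (if PySem.Set.contains P.1
            (PySem.Str.join "," ([b - a, c - b, d - c, e - d].map PySem.Int.toStr)) then P
       else (PySem.Set.add P.1
               (PySem.Str.join "," ([b - a, c - b, d - c, e - d].map PySem.Int.toStr)),
             P.2.insert (PySem.Str.join "," ([b - a, c - b, d - c, e - d].map PySem.Int.toStr))
               (P.2.getD (PySem.Str.join ","
                 ([b - a, c - b, d - c, e - d].map PySem.Int.toStr)) 0 + e))) := by
  simp only [pvA_step]
  rw [pv_seq_eq ps j a b c d e [] hdrop]
  have hdiff : (PySem.List.pyRange 0 ((([a, b, c, d, e] : List Int).length : Int) - 1) 1).map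
      (fun t => PySem.List.pyGetD ([a, b, c, d, e] : List Int) (t + 1) 0
        - PySem.List.pyGetD ([a, b, c, d, e] : List Int) t 0)
      = [b - a, c - b, d - c, e - d] := by
    rw [show ((([a, b, c, d, e] : List Int).length : Int) - 1) = 4 by simp,
        show PySem.List.pyRange 0 4 1 = [0, 1, 2, 3] by decide]
    simp [PySem.List.pyGetD_ofNat']
  have hlast : PySem.List.pyGetD ([a, b, c, d, e] : List Int) (-1) 0 = e := by
    simp [PySem.List.pyGetD, PySem.List.pyGet?, PySem.List.pyIdx?]
  rw [hdiff, hlast]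
  set key := PySem.Str.join "," (([b - a, c - b, d - c, e - d] : List Int).map PySem.Int.toStr)
  by_cases hs : key ∈ P.1
  · simp [hs]
  · by_cases hc : P.2.contains key = true
    · simp [hs, hc]
      rfl
    · rw [Bool.not_eq_true] at hc
      simp [hs, hc, PySem.Dict.getD_of_not_contains P.2 0 hc]

-- the streaming invariant: B's fold state after t iterations, in terms of A's ghost data
lemma pvAfold_zero (ps : List Int) (d0 : PySem.Dict String Int) :
    pvAfold ps d0 0 = ((PySem.Set.empty : PySem.Set String), d0) := by
  simp [pvAfold, PySem.List.pyRange_one_eq_nil]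

lemma pv_inv (init : Int) (d0 : PySem.Dict String Int) (t : Nat) :
    (PySem.List.pyRange 0 (t : Int) 1).foldl pvB_iter
      (init, PySem.Int.mod init 10, ([] : List Int), (PySem.Set.empty : PySem.Set String), d0)
    = ((pvGen init t).1, (pvGen init t).2.getLastD 0,
       (pvDiffs (pvGen init t).2).drop (t - 4), pvAfold (pvGen init t).2 d0 (t - 3)) := by
  induction t with
  | zero =>
    rw [PySem.List.pyRange_one_eq_nil (by simp)]
    rw [show pvGen init 0 = (init, [PySem.Int.mod init 10]) by
      unfold pvGen; rw [PySem.List.pyRange_one_eq_nil (by simp)]; rfl]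
    rw [pvAfold_zero]
    rfl
  | succ t ih =>
    rw [show ((t + 1 : Nat) : Int) = (t : Int) + 1 by push_cast; ring,
        PySem.List.pyRange_one_succ_right (by positivity), List.foldl_append, ih,
        List.foldl_cons, List.foldl_nil]
    set sigma := (pvGen init t).1 with hsig
    set ps := (pvGen init t).2 with hps
    have hgen : pvGen init (t + 1)
        = (pvA_next_secret sigma, ps ++ [PySem.Int.mod (pvA_next_secret sigma) 10]) := by
      rw [pvGen_succ]; rfl
    set p := PySem.Int.mod (pvA_next_secret sigma) 10 with hp
    have hps_len : ps.length = t + 1 := pvGen_len init t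
    have hps_ne : ps ≠ [] := by
      intro h; rw [h] at hps_len; simp at hps_len
    have hdl : (pvDiffs ps).length = t := by
      rw [pvDiffs_length, hps_len]; omega
    have hsn : pvDiffs (ps ++ [p]) = pvDiffs ps ++ [p - ps.getLastD 0] :=
      pvDiffs_snoc ps p hps_ne
    have hw : PySem.List.slice ((pvDiffs ps).drop (t - 4) ++ [p - ps.getLastD 0]) (some (-4)) none
        = (pvDiffs (ps ++ [p])).drop (t + 1 - 4) := by
      rw [PySem.List.slice_from_neg_ofNat _ 4 (by omega),
          show ((pvDiffs ps).drop (t - 4) ++ [p - ps.getLastD 0]).length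
            = (t - (t - 4)) + 1 by simp [hdl],
          ← List.drop_append_of_le_length (by omega), List.drop_drop, hsn]
      congr 1
      omega
    have hwlen : ((pvDiffs (ps ++ [p])).drop (t + 1 - 4)).length = min (t + 1) 4 := by
      have h1 : (pvDiffs (ps ++ [p])).length = t + 1 := by
        rw [pvDiffs_length]; simp [hps_len]
      rw [List.length_drop, h1]; omega
    have hlastnew : (ps ++ [p]).getLastD 0 = p := by simp
    simp only [pvB_iter, hgen]
    rw [show pvB_next_secret sigma = pvA_next_secret sigma from rfl]
    rw [← hp]
    rw [hw, hlastnew]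
    rcases Nat.lt_or_ge t 3 with h3 | h3
    · -- fewer than 4 diffs yet: no window completes, A's fold range is empty too
      rw [if_neg (by rw [hwlen]; omega)]
      rw [show t + 1 - 3 = 0 by omega, show t - 3 = 0 by omega, pvAfold_zero, pvAfold_zero]
    · -- a window completes at index t-3; it is A's step at that index
      rw [if_pos (by rw [hwlen]; omega)]
      have hlen' : (ps ++ [p]).length = t + 2 := by simp [hps_len]
      obtain ⟨a, b, c, d, e, t0, hdrop⟩ :=
        pv_five_of_len ((ps ++ [p]).drop (t - 3)) (by rw [List.length_drop, hlen']; omega)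
      have ht0 : t0 = [] := by
        have hl := congrArg List.length hdrop
        rw [List.length_drop, hlen'] at hl
        simp at hl
        exact List.eq_nil_of_length_eq_zero (by omega)
      rw [ht0] at hdrop
      have hep : e = p := by
        have h1 : (ps ++ [p])[(t - 3) + 4]? = some e := by
          rw [← List.getElem?_drop, hdrop]; rfl
        have h2 : (ps ++ [p])[(t - 3) + 4]? = some p := by
          rw [show (t - 3) + 4 = ps.length by omega]
          simp
        rw [h1] at h2
        exact Option.some_inj.mp h2
      have hwkey : (pvDiffs (ps ++ [p])).drop (t + 1 - 4) = [b - a, c - b, d - c, e - d] := by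
        rw [show t + 1 - 4 = t - 3 by omega, pvDiffs_drop, hdrop]
        simp [pvDiffs]
      have hA1 : pvAfold (ps ++ [p]) d0 (t + 1 - 3)
          = pvA_step (ps ++ [p]) (pvAfold (ps ++ [p]) d0 (t - 3)) ((t - 3 : Nat) : Int) := by
        unfold pvAfold
        rw [show ((t + 1 - 3 : Nat) : Int) = ((t - 3 : Nat) : Int) + 1 by omega,
            PySem.List.pyRange_one_succ_right (by positivity), List.foldl_append]
        rfl
      have hA2 : pvAfold (ps ++ [p]) d0 (t - 3) = pvAfold ps d0 (t - 3) :=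
        pvAfold_append ps [p] d0 (t - 3) (by omega)
      rw [hwkey, hA1, hA2,
          pvA_step_last (ps ++ [p]) (pvAfold ps d0 (t - 3)) (t - 3) a b c d e hdrop, hep]
      split_ifs <;> rfl
  

lemma pv_range_toNat (n : Int) :
    PySem.List.pyRange 0 n 1 = PySem.List.pyRange 0 ((n.toNat : Nat) : Int) 1 := by
  by_cases h : 0 ≤ n
  · rw [Int.toNat_of_nonneg h]
  · rw [PySem.List.pyRange_one_eq_nil (by omega), PySem.List.pyRange_one_eq_nil (by omega)]

-- ===== VERDICT (by name: the statement is the Claim_ definition above) =====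
theorem find_best_sequence_spec : Claim_equal_find_best_sequence := by
  intro init iters result _
  unfold Spec_find_best_sequence find_best_sequence find_best_sequence_alt pvA_generate_prices
  rw [pv_range_toNat iters]
  set t := iters.toNat with ht
  rw [pv_inv init (PySem.Dict.ofList result) t]
  have hlen : (pvGen init t).2.length = t + 1 := pvGen_len init t
  have hrange : PySem.List.pyRange 0 (((pvGen init t).2.length : Int) - 4) 1
      = PySem.List.pyRange 0 ((t - 3 : Nat) : Int) 1 := by
    rw [hlen]
    rcases Nat.lt_or_ge t 3 with h3 | h3
    · rw [PySem.List.pyRange_one_eq_nil (by omega), PySem.List.pyRange_one_eq_nil (by omega)]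
    · congr 1; omega
  show ((PySem.List.pyRange 0 (((pvGen init t).2.length : Int) - 4) 1).foldl
      (pvA_step (pvGen init t).2)
      ((PySem.Set.empty : PySem.Set String), PySem.Dict.ofList result)).2.items = _
  rw [hrange]
  rfl
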